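-- pv_equiv track=rewrite | github.com/Asalmerontkd/sklearnDemo | ner-trainer.py | prepara_frase
-- ===== SOURCE A (Python) =====
-- def prepara_frase(words):
-- 	features=[]
-- 	feature={}
-- 	for i in range(len(words[2:-2])):
-- 		i=i+2
-- 		feature['0']=str(words[i-2]).lower()
-- 		feature['1']=str(words[i-1]).lower()
-- 		feature['2']=str(words[i]).lower()
-- 		feature['3']=str(words[i+1]).lower()
-- 		feature['4']=str(words[i+2]).lower()
-- 		features.append(feature)
-- 		feature={}
-- 	return features
-- ===== SOURCE B (Python) =====
-- def prepara_frase(words):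
--     features = []
--     win = []
--     for w in words:
--         win.append(str(w).lower())
--         if len(win) == 5:
--             features.append(dict(zip(('0', '1', '2', '3', '4'), win)))
--             win.pop(0)
--     return features
-- ===== Notes on version B (the rewrite author's own statement) =====
-- stated objective: alternative
-- what changed: Replaced A's index loop (computing five window indices per step into the list) by a single streaming pass that maintains an explicit 5-element sliding-window buffer (append each lowered word, emit a dict from the buffer when full, pop the oldest), so no indices or slices are ever computed.
import Mathlib
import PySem

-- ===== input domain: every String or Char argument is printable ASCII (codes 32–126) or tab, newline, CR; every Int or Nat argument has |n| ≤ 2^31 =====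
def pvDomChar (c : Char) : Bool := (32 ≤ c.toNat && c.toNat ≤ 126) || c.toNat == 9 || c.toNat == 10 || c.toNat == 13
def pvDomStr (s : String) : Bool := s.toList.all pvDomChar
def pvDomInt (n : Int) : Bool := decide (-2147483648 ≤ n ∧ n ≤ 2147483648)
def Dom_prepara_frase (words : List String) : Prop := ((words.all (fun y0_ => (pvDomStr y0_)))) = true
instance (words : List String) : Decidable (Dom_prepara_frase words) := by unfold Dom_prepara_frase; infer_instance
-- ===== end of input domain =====

-- B replaces A's index loop (five computed indices per window) by a single streaming pass
-- maintaining an explicit 5-element sliding-window buffer (append, emit when full, pop oldest);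
-- same return value, same cost (objective: alternative).

-- ===== PORT A =====
def prepara_frase (words : List String) : List (List (String × String)) :=
  (PySem.List.pyRange 0 ((PySem.List.slice words (some 2) (some (-2))).length : Int) 1).foldl
    (fun features i0 =>
      let i := i0 + 2
      let feature : PySem.Dict String String := PySem.Dict.empty
      let feature := feature.insert "0" (PySem.Str.lower (PySem.List.pyGetD words (i - 2) ""))
      let feature := feature.insert "1" (PySem.Str.lower (PySem.List.pyGetD words (i - 1) ""))
      let feature := feature.insert "2" (PySem.Str.lower (PySem.List.pyGetD words i ""))
      let feature := feature.insert "3" (PySem.Str.lower (PySem.List.pyGetD words (i + 1) ""))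
      let feature := feature.insert "4" (PySem.Str.lower (PySem.List.pyGetD words (i + 2) ""))
      features ++ [feature.items]) []

-- ===== PORT B =====
-- loop body of Source B: state is (win, features); win.pop(0) is the drop of the buffer's head
def pvStepB (st : List String × List (List (String × String))) (w : String) :
    List String × List (List (String × String)) :=
  let win := st.1 ++ [PySem.Str.lower w]
  if win.length == 5 then
    (win.drop 1, st.2 ++ [List.zip ["0", "1", "2", "3", "4"] win])
  else (win, st.2)

def prepara_frase_alt (words : List String) : List (List (String × String)) :=
  (words.foldl pvStepB ([], [])).2

-- ===== PRECONDITION & SPEC =====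
def Spec_prepara_frase (words : List String) (out : List (List (String × String))) : Prop := out = prepara_frase_alt words
instance (words : List String) (out : List (List (String × String))) : Decidable (Spec_prepara_frase words out) := by unfold Spec_prepara_frase; infer_instance

-- ===== CLAIM (what is proved, stated in full; the proofs are below) =====
def Claim_equal_prepara_frase : Prop := ∀ (words : List String), Dom_prepara_frase words → Spec_prepara_frase words (prepara_frase words)

-- ===== LEMMAS AND PROOFS =====

-- the window at index k, as A produces it
def pvWin (ws : List String) (k : Nat) : List (String × String) :=
  [("0", PySem.Str.lower (ws.getD k "")), ("1", PySem.Str.lower (ws.getD (k+1) "")),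
   ("2", PySem.Str.lower (ws.getD (k+2) "")), ("3", PySem.Str.lower (ws.getD (k+3) "")),
   ("4", PySem.Str.lower (ws.getD (k+4) ""))]

-- all 5-windows of an (already lowered) list
def pvWins : List String → List (List (String × String))
  | a :: b :: c :: d :: e :: r =>
      [("0", a), ("1", b), ("2", c), ("3", d), ("4", e)] :: pvWins (b :: c :: d :: e :: r)
  | _ => []
termination_by l => l.length

lemma pvLenSlice (ws : List String) :
    (PySem.List.slice ws (some 2) (some (-2))).length = ws.length - 4 := by
  rw [PySem.List.length_slice]; simp [pysem]; omega

lemma pvA (ws : List String) :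
    prepara_frase ws = (List.range (ws.length - 4)).map (pvWin ws) := by
  unfold prepara_frase
  rw [pvLenSlice, PySem.List.pyRange_zero_nat, List.foldl_map]
  rw [PySem.List.foldl_append_singleton_eq_map
    (f := fun k : Nat =>
      ((((((PySem.Dict.empty (κ := String) (ν := String)).insert "0"
          (PySem.Str.lower (PySem.List.pyGetD ws ((k : Int) + 2 - 2) ""))).insert "1"
          (PySem.Str.lower (PySem.List.pyGetD ws ((k : Int) + 2 - 1) ""))).insert "2"
          (PySem.Str.lower (PySem.List.pyGetD ws ((k : Int) + 2) ""))).insert "3"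
          (PySem.Str.lower (PySem.List.pyGetD ws ((k : Int) + 2 + 1) ""))).insert "4"
          (PySem.Str.lower (PySem.List.pyGetD ws ((k : Int) + 2 + 2) ""))).items)]
  simp only [List.nil_append]
  apply List.map_congr_left
  intro k _
  show [("0", PySem.Str.lower (PySem.List.pyGetD ws ((k : Int) + 2 - 2) "")),
        ("1", PySem.Str.lower (PySem.List.pyGetD ws ((k : Int) + 2 - 1) "")),
        ("2", PySem.Str.lower (PySem.List.pyGetD ws ((k : Int) + 2) "")),
        ("3", PySem.Str.lower (PySem.List.pyGetD ws ((k : Int) + 2 + 1) "")),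
        ("4", PySem.Str.lower (PySem.List.pyGetD ws ((k : Int) + 2 + 2) ""))] = pvWin ws k
  have h0 : (k : Int) + 2 - 2 = ((k : Nat) : Int) := by omega
  have h1 : (k : Int) + 2 - 1 = ((k + 1 : Nat) : Int) := by push_cast; omega
  have h2 : (k : Int) + 2 = ((k + 2 : Nat) : Int) := by push_cast; omega
  have h3 : (k : Int) + 2 + 1 = ((k + 3 : Nat) : Int) := by push_cast; omega
  have h4 : (k : Int) + 2 + 2 = ((k + 4 : Nat) : Int) := by push_cast; omega
  rw [h0, h1, h3, h4, h2]
  simp only [PySem.List.pyGetD_natCast, pvWin]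

lemma pvWin_cons (a : String) (t : List String) (k : Nat) :
    pvWin (a :: t) (k + 1) = pvWin t k := by
  simp [pvWin]

-- A's windows coincide with pvWins of the lowered list
lemma pvAWins : ∀ ws : List String,
    (List.range (ws.length - 4)).map (pvWin ws) = pvWins (ws.map PySem.Str.lower) := by
  intro ws
  induction ws with
  | nil => simp [pvWins]
  | cons a t ih =>
    rcases t with _ | ⟨b, _ | ⟨c, _ | ⟨d, _ | ⟨e, r⟩⟩⟩⟩
    · simp [pvWins]
    · simp [pvWins]
    · simp [pvWins]
    · simp [pvWins]
    · have hlen : (a :: b :: c :: d :: e :: r).length - 4 = r.length + 1 := by simp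
      rw [hlen, List.range_succ_eq_map, List.map_cons, List.map_map]
      have htail : (pvWin (a :: b :: c :: d :: e :: r) ∘ Nat.succ) =
          pvWin (b :: c :: d :: e :: r) := by
        funext k
        exact pvWin_cons a _ k
      rw [htail]
      have hlen2 : (b :: c :: d :: e :: r).length - 4 = r.length := by simp
      rw [← hlen2, ih]
      simp [pvWin, pvWins]

-- B's loop invariant: with a full (4-element) buffer, the fold emits exactly the windows
lemma pvFold4 : ∀ (xs : List String) (p q r s : String)
    (acc : List (List (String × String))),
    (xs.foldl pvStepB ([p, q, r, s], acc)).2 =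
      acc ++ pvWins ([p, q, r, s] ++ xs.map PySem.Str.lower) := by
  intro xs
  induction xs with
  | nil => intro p q r s acc; simp [pvWins]
  | cons x t ih =>
    intro p q r s acc
    have hstep : pvStepB ([p, q, r, s], acc) x =
        ([q, r, s, PySem.Str.lower x],
         acc ++ [List.zip ["0", "1", "2", "3", "4"] [p, q, r, s, PySem.Str.lower x]]) := by
      simp [pvStepB]
    rw [List.foldl_cons, hstep, ih]
    simp [pvWins, List.zip]

lemma pvAltWins : ∀ ws : List String,
    prepara_frase_alt ws = pvWins (ws.map PySem.Str.lower) := by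
  intro ws
  rcases ws with _ | ⟨a, _ | ⟨b, _ | ⟨c, _ | ⟨d, t⟩⟩⟩⟩
  · simp [prepara_frase_alt, pvWins]
  · simp [prepara_frase_alt, pvStepB, pvWins]
  · simp [prepara_frase_alt, pvStepB, pvWins]
  · simp [prepara_frase_alt, pvStepB, pvWins]
  · show ((a :: b :: c :: d :: t).foldl pvStepB ([], [])).2 = _
    have h4 : (a :: b :: c :: d :: t).foldl pvStepB ([], []) =
        t.foldl pvStepB
          ([PySem.Str.lower a, PySem.Str.lower b, PySem.Str.lower c, PySem.Str.lower d], []) := by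
      simp [List.foldl_cons, pvStepB]
    rw [h4, pvFold4]
    simp

-- ===== VERDICT (by name: the statement is the Claim_ definition above) =====
theorem prepara_frase_spec : Claim_equal_prepara_frase := by
  intro words _
  unfold Spec_prepara_frase
  rw [pvA, pvAWins, ← pvAltWins]
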